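-- pv_equiv track=rewrite | github.com/aw0605/CodingTest | 프로그래머스/2/42626. 더 맵게/더 맵게.py | solution
-- ===== SOURCE A (Python) =====
-- from collections import deque
--
-- def solution(scoville, K):
--     answer = 0
--     mix = deque()
--     scoville.sort()
--     sco = deque(v for v in scoville)
--
--     while (sco and sco[0] < K) or (mix and mix[0] < K):
--         if len(sco) + len(mix) <= 1: return -1
--
--         food = [0] * 2
--         for i in range(2):
--             if sco and mix:
--                 if sco[0] < mix[0]: food[i] = sco.popleft()
--                 else: food[i] = mix.popleft()
--             elif sco: food[i] = sco.popleft()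
--             else: food[i] = mix.popleft()
--
--         mix.append(food[0]+food[1]*2)
--         answer += 1
--
--     return answer
-- ===== SOURCE B (Python) =====
-- def _ins(xs, v):
--     """Insert v into the sorted list xs (after any equal elements), returning a new list."""
--     i = 0
--     while i < len(xs) and xs[i] <= v:
--         i += 1
--     return xs[:i] + [v] + xs[i:]
--
-- def solution(scoville, K):
--     scoville.sort()          # same in-place sort (side effect) as the original
--     pot = list(scoville)     # one sorted pool instead of two queues
--     answer = 0
--     while pot and pot[0] < K:
--         if len(pot) < 2:
--             return -1
--         new = pot[0] + 2 * pot[1]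
--         pot = _ins(pot[2:], new)
--         answer += 1
--     return answer
-- ===== Notes on version B (the rewrite author's own statement) =====
-- stated objective: alternative
-- what changed: A merges two deques (the sorted input queue and a FIFO of created values, comparing fronts); B keeps one sorted pool, always takes its two head elements and re-inserts the new value at its sorted position.
import Mathlib
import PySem

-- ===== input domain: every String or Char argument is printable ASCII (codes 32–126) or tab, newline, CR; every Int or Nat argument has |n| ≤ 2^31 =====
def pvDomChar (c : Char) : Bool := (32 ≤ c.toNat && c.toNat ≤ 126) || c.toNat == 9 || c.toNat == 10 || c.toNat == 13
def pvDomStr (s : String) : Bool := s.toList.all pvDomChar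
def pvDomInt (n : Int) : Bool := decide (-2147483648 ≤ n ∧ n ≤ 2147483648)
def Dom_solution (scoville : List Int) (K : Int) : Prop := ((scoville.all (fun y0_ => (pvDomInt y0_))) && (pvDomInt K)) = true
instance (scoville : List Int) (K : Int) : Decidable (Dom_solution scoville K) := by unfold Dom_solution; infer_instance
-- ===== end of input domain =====

-- B replaces A's two-queue merge by a single sorted pool with ordered insertion (alternative
-- data structure, not faster); both implementations sort the argument list in place (same side
-- effect), and the equivalence proved here is about the return value.

-- ===== PORT A =====
-- one iteration of A's inner `for i in range(2)` body: pop the smaller front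
-- (ties and empty-`sco` go to `mix`, exactly as the Python branches read)
def popA (sco mix : List Int) : Int × List Int × List Int :=
  match sco, mix with
  | s :: st, m :: mt => if s < m then (s, st, m :: mt) else (m, s :: st, mt)
  | s :: st, [] => (s, st, [])
  | [], m :: mt => (m, [], mt)
  | [], [] => (0, [], [])  -- unreachable: Python would raise here, but the `len <= 1` guard fires first

-- `l and l[0] < K` for a deque
def frontLT (K : Int) (l : List Int) : Bool :=
  match l with
  | [] => false
  | x :: _ => decide (x < K)

-- termination helper for loopA (cited by decreasing_by): each pop removes one element
theorem popA_len (sco mix : List Int) (h : sco.length + mix.length ≠ 0) :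
    (popA sco mix).2.1.length + (popA sco mix).2.2.length + 1 = sco.length + mix.length := by
  cases sco <;> cases mix <;> simp [popA] at h ⊢
  split <;> simp <;> omega

-- A's while loop
def loopA (K : Int) (sco mix : List Int) (answer : Int) : Int :=
  if frontLT K sco || frontLT K mix then
    if h1 : sco.length + mix.length ≤ 1 then -1
    else
      let p := popA sco mix
      let q := popA p.2.1 p.2.2
      loopA K q.2.1 (q.2.2 ++ [p.1 + q.1 * 2]) (answer + 1)
  else answer
termination_by sco.length + mix.length
decreasing_by
  have h2 := popA_len sco mix (by omega)
  have h3 := popA_len (popA sco mix).2.1 (popA sco mix).2.2 (by omega)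
  simp only [List.length_append, List.length_cons, List.length_nil]
  omega

def solution (scoville : List Int) (K : Int) : Int :=
  loopA K (PySem.List.sorted scoville (fun x => x) false) [] 0

-- ===== PORT B =====
-- Source B's _ins: insert v into the sorted list xs, after any equal elements
def insB (xs : List Int) (v : Int) : List Int :=
  match xs with
  | [] => [v]
  | x :: t => if x ≤ v then x :: insB t v else v :: x :: t

-- termination helper for loopB (cited by decreasing_by)
theorem insB_length (xs : List Int) (v : Int) : (insB xs v).length = xs.length + 1 := by
  induction xs with
  | nil => simp [insB]
  | cons x t ih => simp only [insB]; split <;> simp [ih]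

-- Source B's while loop over the single sorted pool
def loopB (K : Int) (pot : List Int) (answer : Int) : Int :=
  match pot with
  | [] => answer
  | p0 :: rest =>
    if p0 < K then
      match rest with
      | [] => -1
      | p1 :: rest2 => loopB K (insB rest2 (p0 + 2 * p1)) (answer + 1)
    else answer
termination_by pot.length
decreasing_by
  simp [insB_length]

def solution_alt (scoville : List Int) (K : Int) : Int :=
  loopB K (PySem.List.sorted scoville (fun x => x) false) 0

-- ===== PRECONDITION & SPEC =====
def Spec_solution (scoville : List Int) (K : Int) (out : Int) : Prop := out = solution_alt scoville K
instance (scoville : List Int) (K : Int) (out : Int) : Decidable (Spec_solution scoville K out) := by unfold Spec_solution; infer_instance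

-- ===== CLAIM (what is proved, stated in full; the proofs are below) =====
def Claim_equal_solution : Prop := ∀ (scoville : List Int) (K : Int), Dom_solution scoville K → Spec_solution scoville K (solution scoville K)

-- ===== LEMMAS AND PROOFS =====

-- The coupling invariant between A's state (sco, mix) and B's state pot:
-- all three lists are sorted, pot is a permutation of sco ++ mix, and three facts about mix
-- that keep A's `mix` deque behaving like part of one sorted pool:
--   * mix can only hold ≥ 2 elements when every remaining value is nonnegative,
--   * in the nonnegative regime every element of mix is ≤ p0 + 2*p1 (the next value created),
--   * if the global minimum p0 is negative, every element of mix is ≤ p0 (hence equals it).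
def PoolRel (sco mix pot : List Int) : Prop :=
  sco.Pairwise (· ≤ ·) ∧ mix.Pairwise (· ≤ ·) ∧ pot.Pairwise (· ≤ ·) ∧
  (sco ++ mix).Perm pot ∧
  (2 ≤ mix.length → ∀ x ∈ pot, 0 ≤ x) ∧
  ((∀ x ∈ pot, 0 ≤ x) → ∀ p0 p1 rest2, pot = p0 :: p1 :: rest2 → ∀ m ∈ mix, m ≤ p0 + 2 * p1) ∧
  (∀ p0 rest, pot = p0 :: rest → p0 < 0 → ∀ m ∈ mix, m ≤ p0)

theorem head_le_of_pairwise {p : Int} {l : List Int} (h : (p :: l).Pairwise (· ≤ ·)) :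
    ∀ x ∈ p :: l, p ≤ x := by
  intro x hx
  rcases List.mem_cons.mp hx with rfl | hx
  · exact le_rfl
  · exact (List.pairwise_cons.mp h).1 x hx

-- one pop of A, on sorted queues: the popped value is the global minimum, ties go to mix
theorem popA_spec (sco mix : List Int) (hs : sco.Pairwise (· ≤ ·)) (hm : mix.Pairwise (· ≤ ·))
    (hne : sco.length + mix.length ≠ 0) :
    ∃ f s' m', popA sco mix = (f, s', m') ∧
      s'.Pairwise (· ≤ ·) ∧ m'.Pairwise (· ≤ ·) ∧
      (f :: (s' ++ m')).Perm (sco ++ mix) ∧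
      (∀ x ∈ s' ++ m', f ≤ x) ∧
      m' <:+ mix ∧
      (m' = mix → ∀ y ∈ mix, f < y) := by
  match sco, mix with
  | [], [] => simp at hne
  | s :: st, [] =>
    refine ⟨s, st, [], rfl, hs.of_cons, List.Pairwise.nil, by simp, ?_, List.suffix_refl _, by simp⟩
    intro x hx
    simp at hx
    exact (List.pairwise_cons.mp hs).1 x hx
  | [], m :: mt =>
    refine ⟨m, [], mt, rfl, List.Pairwise.nil, hm.of_cons, by simp, ?_, List.suffix_cons m mt, ?_⟩
    · intro x hx
      simp at hx
      exact (List.pairwise_cons.mp hm).1 x hx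
    · intro h
      exact absurd (congrArg List.length h) (by simp)
  | s :: st, m :: mt =>
    by_cases hsm : s < m
    · refine ⟨s, st, m :: mt, by simp [popA, hsm], hs.of_cons, hm, by simp, ?_, List.suffix_refl _, ?_⟩
      · intro x hx
        rcases List.mem_append.mp hx with hx | hx
        · exact (List.pairwise_cons.mp hs).1 x hx
        · exact le_of_lt (lt_of_lt_of_le hsm (head_le_of_pairwise hm x hx))
      · intro _ y hy
        exact lt_of_lt_of_le hsm (head_le_of_pairwise hm y hy)
    · refine ⟨m, s :: st, mt, by simp [popA, hsm], hs, hm.of_cons, ?_, ?_, List.suffix_cons m mt, ?_⟩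
      · exact (List.perm_middle).symm
      · intro x hx
        rcases List.mem_append.mp hx with hx | hx
        · exact le_trans (not_lt.mp hsm) (head_le_of_pairwise hs x hx)
        · exact (List.pairwise_cons.mp hm).1 x hx
      · intro h
        exact absurd (congrArg List.length h) (by simp)

theorem insB_perm (xs : List Int) (v : Int) : (insB xs v).Perm (v :: xs) := by
  induction xs with
  | nil => simp [insB]
  | cons x t ih =>
    simp only [insB]
    split
    · exact (ih.cons x).trans (List.Perm.swap v x t)
    · exact List.Perm.refl _

theorem mem_insB {xs : List Int} {v y : Int} (h : y ∈ insB xs v) : y = v ∨ y ∈ xs := by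
  have := (insB_perm xs v).mem_iff.mp h
  simpa using this

theorem insB_mem_self (xs : List Int) (v : Int) : v ∈ insB xs v :=
  (insB_perm xs v).mem_iff.mpr (by simp)

theorem insB_mem_of {xs : List Int} {v y : Int} (h : y ∈ xs) : y ∈ insB xs v :=
  (insB_perm xs v).mem_iff.mpr (by simp [h])

theorem insB_sorted (xs : List Int) (v : Int) (h : xs.Pairwise (· ≤ ·)) :
    (insB xs v).Pairwise (· ≤ ·) := by
  induction xs with
  | nil => simp [insB]
  | cons x t ih =>
    simp only [insB]
    split
    · rename_i hxv
      refine List.pairwise_cons.mpr ⟨?_, ih h.of_cons⟩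
      intro y hy
      rcases mem_insB hy with rfl | hy
      · exact hxv
      · exact (List.pairwise_cons.mp h).1 y hy
    · rename_i hxv
      refine List.pairwise_cons.mpr ⟨?_, h⟩
      intro y hy
      have hvx : v ≤ x := le_of_lt (not_le.mp hxv)
      rcases List.mem_cons.mp hy with rfl | hy
      · exact hvx
      · exact le_trans hvx ((List.pairwise_cons.mp h).1 y hy)

theorem loopAB (n : Nat) : ∀ (sco mix pot : List Int) (K ans : Int),
    pot.length ≤ n → PoolRel sco mix pot → loopA K sco mix ans = loopB K pot ans := by
  induction n with
  | zero =>
    intro sco mix pot K ans hlen hrel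
    obtain ⟨hs, hm, hp, hperm, hA, hB, hC⟩ := hrel
    have h0 : pot = [] := List.length_eq_zero_iff.mp (by omega)
    subst h0
    have hsm : sco ++ mix = [] := List.length_eq_zero_iff.mp (by simpa using hperm.length_eq)
    have hsco : sco = [] := by cases sco <;> simp_all
    have hmix : mix = [] := by cases mix <;> simp_all
    subst hsco; subst hmix
    rw [loopA, loopB]
    simp [frontLT]
  | succ n ih =>
    intro sco mix pot K ans hlen hrel
    obtain ⟨hs, hm, hp, hperm, hA, hB, hC⟩ := hrel
    rcases pot with _ | ⟨p0, rest⟩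
    · -- empty pool again
      have hsm : sco ++ mix = [] := List.length_eq_zero_iff.mp (by simpa using hperm.length_eq)
      have hsco : sco = [] := by cases sco <;> simp_all
      have hmix : mix = [] := by cases mix <;> simp_all
      subst hsco; subst hmix
      rw [loopA, loopB]
      simp [frontLT]
    have hheadle : ∀ x ∈ p0 :: rest, p0 ≤ x := head_le_of_pairwise hp
    by_cases hK : p0 < K
    · -- the condition of A's while holds: the queue holding p0 has p0 at its front
      have hcond : (frontLT K sco || frontLT K mix) = true := by
        rcases List.mem_append.mp
            (hperm.mem_iff.mpr (show p0 ∈ p0 :: rest by simp)) with h | h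
        · rcases sco with _ | ⟨a, t⟩
          · simp at h
          · have ha : a = p0 := le_antisymm (head_le_of_pairwise hs p0 h)
              (hheadle a (hperm.mem_iff.mp (show a ∈ (a :: t) ++ mix by simp)))
            subst ha
            simp [frontLT, hK]
        · rcases mix with _ | ⟨a, t⟩
          · simp at h
          · have ha : a = p0 := le_antisymm (head_le_of_pairwise hm p0 h)
              (hheadle a (hperm.mem_iff.mp (show a ∈ sco ++ a :: t by simp)))
            subst ha
            simp [frontLT, hK]
      rcases rest with _ | ⟨p1, rest2⟩
      · -- singleton pool: A returns -1 via the length guard, B returns -1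
        have hlen1 : sco.length + mix.length = 1 := by simpa using hperm.length_eq
        rw [loopA, loopB]
        rw [hcond]
        simp [hlen1, hK]
      -- the genuine step: A pops twice, B takes the two heads
      have hlen2 : sco.length + mix.length = rest2.length + 2 := by
        simpa using hperm.length_eq
      obtain ⟨f0, s1, m1, hpop1, hs1, hm1, hperm1, hmin1, hsuf1, hstrict1⟩ :=
        popA_spec sco mix hs hm (by omega)
      have hpool1 : (f0 :: (s1 ++ m1)).Perm (p0 :: p1 :: rest2) := hperm1.trans hperm
      have hf0 : f0 = p0 := by
        have h1 : p0 ≤ f0 := hheadle f0 (hpool1.mem_iff.mp (show f0 ∈ f0 :: (s1 ++ m1) by simp))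
        have h2 : f0 ≤ p0 := by
          rcases List.mem_cons.mp
              (hpool1.mem_iff.mpr (show p0 ∈ p0 :: p1 :: rest2 by simp)) with h | h
          · exact le_of_eq h.symm
          · exact hmin1 p0 h
        exact le_antisymm h2 h1
      rw [hf0] at hpop1 hpool1 hmin1 hstrict1
      have hperm1' : (s1 ++ m1).Perm (p1 :: rest2) := hpool1.cons_inv
      have htail : (p1 :: rest2).Pairwise (· ≤ ·) := hp.of_cons
      have hheadle1 : ∀ x ∈ p1 :: rest2, p1 ≤ x := head_le_of_pairwise htail
      obtain ⟨f1, s2, m2, hpop2, hs2, hm2, hperm2, hmin2, hsuf2, hstrict2⟩ :=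
        popA_spec s1 m1 hs1 hm1 (by have := hperm1'.length_eq; simp at this; omega)
      have hpool2 : (f1 :: (s2 ++ m2)).Perm (p1 :: rest2) := hperm2.trans hperm1'
      have hf1 : f1 = p1 := by
        have h1 : p1 ≤ f1 := hheadle1 f1 (hpool2.mem_iff.mp (show f1 ∈ f1 :: (s2 ++ m2) by simp))
        have h2 : f1 ≤ p1 := by
          rcases List.mem_cons.mp
              (hpool2.mem_iff.mpr (show p1 ∈ p1 :: rest2 by simp)) with h | h
          · exact le_of_eq h.symm
          · exact hmin2 p1 h
        exact le_antisymm h2 h1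
      rw [hf1] at hpop2 hpool2 hmin2 hstrict2
      have hperm2' : (s2 ++ m2).Perm rest2 := hpool2.cons_inv
      have hm2mix : ∀ m ∈ m2, m ∈ mix := fun m hmm => hsuf1.subset (hsuf2.subset hmm)
      have hm2rest : ∀ m ∈ m2, m ∈ rest2 := fun m hmm =>
        hperm2'.mem_iff.mp (List.mem_append.mpr (Or.inr hmm))
      have hp0p1 : p0 ≤ p1 := hheadle p1 (by simp)
      have hrest2ge : ∀ x ∈ rest2, p1 ≤ x := fun x hx => hheadle1 x (by simp [hx])
      -- the dichotomy: either everything left is nonnegative, or the minimum is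
      -- negative and then A's mix is already exhausted after the two pops
      have hdich : (∀ x ∈ p0 :: p1 :: rest2, 0 ≤ x) ∨ (p0 < 0 ∧ m2 = []) := by
        by_cases hnn : ∀ x ∈ p0 :: p1 :: rest2, 0 ≤ x
        · exact Or.inl hnn
        · right
          simp only [not_forall, not_le, exists_prop] at hnn
          obtain ⟨x, hx, hxneg⟩ := hnn
          have hp0neg : p0 < 0 := lt_of_le_of_lt (hheadle x hx) hxneg
          refine ⟨hp0neg, ?_⟩
          have hmixle : ∀ m ∈ mix, m ≤ p0 := hC p0 (p1 :: rest2) rfl hp0neg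
          have hmixlen : mix.length ≤ 1 := by
            by_contra hlong
            exact absurd (hA (by omega) p0 (show p0 ∈ p0 :: p1 :: rest2 by simp)) (by omega)
          rcases mix with _ | ⟨m, mixt⟩
          · have h1 : m1 = [] := List.length_eq_zero_iff.mp
              (Nat.le_zero.mp (by simpa using hsuf1.length_le))
            rw [h1] at hsuf2
            exact List.length_eq_zero_iff.mp (Nat.le_zero.mp (by simpa using hsuf2.length_le))
          · have hmixt : mixt = [] := by
              cases mixt with
              | nil => rfl
              | cons c ct => simp at hmixlen
            subst hmixt
            have hmval : m = p0 := le_antisymm (hmixle m (by simp))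
              (hheadle m (hperm.mem_iff.mp (List.mem_append.mpr (Or.inr (by simp)))))
            -- the first pop must take the singleton mix (ties go to mix)
            have hm1nil : m1 = [] := by
              rcases hsuf1 with ⟨pre, hpre⟩
              rcases pre with _ | ⟨a, pret⟩
              · -- m1 = mix: then p0 < m = p0, absurd
                simp at hpre
                exfalso
                have := hstrict1 hpre m (by simp)
                omega
              · rcases pret with _ | ⟨b, prett⟩
                · simp at hpre
                  exact hpre.2
                · exfalso
                  have := congrArg List.length hpre
                  simp at this
            rw [hm1nil] at hsuf2
            exact List.length_eq_zero_iff.mp (Nat.le_zero.mp (by simpa using hsuf2.length_le))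
      have hkey1 : ∀ m ∈ m2, m ≤ p0 + 2 * p1 := by
        intro m hmm
        rcases hdich with hnn | ⟨_, hnil⟩
        · exact hB hnn p0 p1 rest2 rfl m (hm2mix m hmm)
        · simp [hnil] at hmm
      -- unfold one step on both sides
      rw [loopA, loopB]
      rw [hcond]
      simp only [if_true, hK]
      rw [dif_neg (by omega)]
      simp only [hpop1, hpop2]
      have hval : p0 + p1 * 2 = p0 + 2 * p1 := by ring
      rw [hval]
      -- apply the induction hypothesis to the new states
      apply ih
      · rw [insB_length]
        simp at hlen
        omega
      · -- re-establish the invariant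
        refine ⟨hs2, ?_, insB_sorted rest2 (p0 + 2 * p1) htail.of_cons, ?_, ?_, ?_, ?_⟩
        · -- m2 ++ [new] sorted
          refine List.pairwise_append.mpr ⟨hm2, by simp, ?_⟩
          intro a ha b hb
          simp at hb
          subst hb
          exact hkey1 a ha
        · -- permutation
          have h1 : s2 ++ (m2 ++ [p0 + 2 * p1]) = (s2 ++ m2) ++ [p0 + 2 * p1] :=
            (List.append_assoc s2 m2 [p0 + 2 * p1]).symm
          rw [h1]
          exact ((hperm2'.append_right [p0 + 2 * p1]).trans
            (List.perm_append_singleton (p0 + 2 * p1) rest2)).trans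
            (insB_perm rest2 (p0 + 2 * p1)).symm
        · -- clause A': mix can only grow past one element in the nonnegative regime
          intro hlong x hx
          have hm2ne : m2 ≠ [] := by
            intro h
            rw [h] at hlong
            simp at hlong
          rcases hdich with hnn | ⟨_, hnil⟩
          · rcases mem_insB hx with rfl | hx
            · have h0 : (0:Int) ≤ p0 := hnn p0 (by simp)
              have h1 : (0:Int) ≤ p1 := hnn p1 (by simp)
              omega
            · exact hnn x (by simp [hx])
          · exact absurd hnil hm2ne
        · -- clause B': every element of the new mix is ≤ the next created value
          intro hnn' q0 q1 r hpot' m hmm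
          have hnewle : p0 + 2 * p1 ≤ q0 + 2 * q1 := by
            rcases rest2 with _ | ⟨a, t⟩
            · simp [insB] at hpot'
            by_cases hav : a ≤ p0 + 2 * p1
            · rw [show insB (a :: t) (p0 + 2 * p1) = a :: insB t (p0 + 2 * p1) by
                simp [insB, hav]] at hpot'
              rcases t with _ | ⟨b, t2⟩
              · -- pot' = [a, new]
                have hpot'' : a :: [p0 + 2 * p1] = q0 :: q1 :: r := by
                  simpa [insB] using hpot'
                injection hpot'' with h1 h2
                injection h2 with h3 _
                have ha0 : (0:Int) ≤ a := hnn' a (insB_mem_of (by simp))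
                have hn0 : (0:Int) ≤ p0 + 2 * p1 := hnn' _ (insB_mem_self _ _)
                omega
              · by_cases hbv : b ≤ p0 + 2 * p1
                · rw [show insB (b :: t2) (p0 + 2 * p1) = b :: insB t2 (p0 + 2 * p1) by
                    simp [insB, hbv]] at hpot'
                  have hq0 : q0 = a := by injection hpot' with h1 _; exact h1.symm
                  have hq1 : q1 = b := by
                    injection hpot' with _ h2
                    injection h2 with h3 _
                    exact h3.symm
                  have ha : p1 ≤ a := hrest2ge a (by simp)
                  have hb : p1 ≤ b := hrest2ge b (by simp)
                  omega
                · rw [show insB (b :: t2) (p0 + 2 * p1) = (p0 + 2 * p1) :: b :: t2 by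
                    simp [insB, hbv]] at hpot'
                  have hq0 : q0 = a := by injection hpot' with h1 _; exact h1.symm
                  have hq1 : q1 = p0 + 2 * p1 := by
                    injection hpot' with _ h2
                    injection h2 with h3 _
                    exact h3.symm
                  have ha0 : (0:Int) ≤ a := hnn' a (insB_mem_of (by simp))
                  omega
            · rw [show insB (a :: t) (p0 + 2 * p1) = (p0 + 2 * p1) :: a :: t by
                simp [insB, hav]] at hpot'
              have hq0 : q0 = p0 + 2 * p1 := by injection hpot' with h1 _; exact h1.symm
              have hq1 : q1 = a := by
                injection hpot' with _ h2
                injection h2 with h3 _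
                exact h3.symm
              have ha0 : (0:Int) ≤ a := hnn' a (insB_mem_of (by simp))
              omega
          rcases List.mem_append.mp hmm with hmm | hmm
          · exact le_trans (hkey1 m hmm) hnewle
          · simp at hmm
            subst hmm
            exact hnewle
        · -- clause C': a negative minimum means the new mix is the singleton [new]
          intro q0 r hpot' hq0neg m hmm
          rcases hdich with hnn | ⟨hp0neg, hnil⟩
          · exfalso
            have hq0mem : q0 ∈ insB rest2 (p0 + 2 * p1) := by rw [hpot']; simp
            have : (0:Int) ≤ q0 := by
              rcases mem_insB hq0mem with rfl | h
              · have h0 := hnn p0 (show p0 ∈ p0 :: p1 :: rest2 by simp)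
                have h1 := hnn p1 (show p1 ∈ p0 :: p1 :: rest2 by simp)
                omega
              · exact hnn q0 (by simp [h])
            omega
          · rw [hnil] at hmm
            simp at hmm
            subst hmm
            have hq0mem : q0 ∈ insB rest2 (p0 + 2 * p1) := by rw [hpot']; simp
            rcases mem_insB hq0mem with heq | h
            · omega
            · have h1 : p1 ≤ q0 := hrest2ge q0 h
              omega
    · -- p0 ≥ K: both loops stop immediately
      have hcond : (frontLT K sco || frontLT K mix) = false := by
        have hsco : frontLT K sco = false := by
          rcases sco with _ | ⟨a, t⟩
          · rfl
          · have : p0 ≤ a := hheadle a (hperm.mem_iff.mp (show a ∈ (a :: t) ++ mix by simp))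
            simp only [frontLT, decide_eq_false_iff_not]
            omega
        have hmix : frontLT K mix = false := by
          rcases mix with _ | ⟨a, t⟩
          · rfl
          · have : p0 ≤ a := hheadle a (hperm.mem_iff.mp (show a ∈ sco ++ a :: t by simp))
            simp only [frontLT, decide_eq_false_iff_not]
            omega
        simp [hsco, hmix]
      rw [loopA, loopB.eq_def]
      rw [hcond]
      simp [hK]

-- ===== VERDICT (by name: the statement is the Claim_ definition above) =====
theorem solution_spec : Claim_equal_solution := by
  intro scoville K _
  unfold Spec_solution solution solution_alt
  apply loopAB (PySem.List.sorted scoville (fun x => x) false).length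
    (PySem.List.sorted scoville (fun x => x) false) []
    (PySem.List.sorted scoville (fun x => x) false) K 0 le_rfl
  refine ⟨?_, List.Pairwise.nil, ?_, by simp, by simp, by simp, by simp⟩
  · exact PySem.List.sorted_pairwise scoville (fun x => x)
  · exact PySem.List.sorted_pairwise scoville (fun x => x)
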